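-- pv_equiv track=rewrite | github.com/eclipse-efbt/efbt | birds_nest/pybirdai/api/enhanced_lineage_api.py | _candidate_output_tables_from_cell_name
-- ===== SOURCE A (Python) =====
-- def _candidate_output_tables_from_cell_name(cell_name, available_table_names):
--     """
--     Resolve output tables from a generated cell/calculation name without knowing
--     any specific report table names.
--
--     Generated cells usually embed the output table name after ``Cell_`` and
--     before the final cell identifier. We choose the longest available evaluated
--     table name that prefixes that remainder.
--     """
--     if not cell_name:
--         return []
--
--     remainder = cell_name[5:] if cell_name.startswith('Cell_') else cell_name
--     matches = [
--         table_name
--         for table_name in available_table_names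
--         if remainder == table_name or remainder.startswith(f'{table_name}_')
--     ]
--     return sorted(matches, key=len, reverse=True)
-- ===== SOURCE B (Python) =====
-- def _candidate_output_tables_from_cell_name(cell_name, available_table_names):
--     if not cell_name:
--         return []
--
--     remainder = cell_name[5:] if cell_name.startswith('Cell_') else cell_name
--
--     # multiplicity of each available table name
--     counts = {}
--     for t in available_table_names:
--         counts[t] = counts.get(t, 0) + 1
--
--     # candidate prefixes of the remainder, longest first: the full remainder,
--     # then remainder[:i] for each '_' position i, scanned from the right
--     candidates = [remainder] + [remainder[:i]
--                                 for i in reversed(range(len(remainder)))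
--                                 if remainder[i] == '_']
--
--     result = []
--     for c in candidates:
--         result.extend([c] * counts.get(c, 0))
--     return result
-- ===== Notes on version B (the rewrite author's own statement) =====
-- stated objective: alternative
-- what changed: A filters every table name by string comparison and then stable-sorts the matches by length; B builds a count dictionary of the table names once, generates the remainder's candidate '_'-prefixes longest-first, and emits each candidate as many times as it was counted, so no sort is needed.
import Mathlib
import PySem

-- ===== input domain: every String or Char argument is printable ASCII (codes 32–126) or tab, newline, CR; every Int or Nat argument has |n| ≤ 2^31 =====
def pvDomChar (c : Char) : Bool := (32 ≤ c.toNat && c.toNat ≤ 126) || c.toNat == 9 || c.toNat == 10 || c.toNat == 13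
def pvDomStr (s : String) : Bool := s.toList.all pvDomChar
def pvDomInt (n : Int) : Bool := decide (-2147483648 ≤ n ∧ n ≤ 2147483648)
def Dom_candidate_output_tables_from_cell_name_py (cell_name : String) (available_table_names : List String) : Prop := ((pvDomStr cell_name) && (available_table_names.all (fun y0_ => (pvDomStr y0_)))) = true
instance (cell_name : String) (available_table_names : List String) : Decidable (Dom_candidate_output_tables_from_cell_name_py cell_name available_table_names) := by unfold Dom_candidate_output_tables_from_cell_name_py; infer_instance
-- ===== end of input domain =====

-- B replaces A's filter-every-table-then-sort with a count dictionary over the table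
-- names looked up at the remainder's candidate prefixes, emitted longest first (no sort).

-- ===== PORT A =====
def candidate_output_tables_from_cell_name_py (cell_name : String) (available_table_names : List String) : List String :=
  if cell_name.toList = [] then []
  else
    let remainder := if PySem.Str.startswith cell_name "Cell_" then PySem.Str.slice cell_name (some 5) none else cell_name
    let matched := available_table_names.filter (fun table_name =>
      remainder == table_name || PySem.Str.startswith remainder (table_name ++ "_"))
    PySem.List.sorted matched (fun t => PySem.Str.len t) true

-- ===== PORT B =====
def candidate_output_tables_from_cell_name_py_alt (cell_name : String) (available_table_names : List String) : List String :=
  if cell_name.toList = [] then []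
  else
    let remainder := if PySem.Str.startswith cell_name "Cell_" then PySem.Str.slice cell_name (some 5) none else cell_name
    let counts : PySem.Dict String Int :=
      available_table_names.foldl (fun d t => d.insert t (d.getD t 0 + 1)) PySem.Dict.empty
    let candidates := remainder ::
      (((List.range remainder.toList.length).reverse.filter
          (fun i => remainder.toList[i]? == some '_')).map
        (fun (i : Nat) => PySem.Str.slice remainder none (some (i : Int))))
    candidates.foldl (fun acc c => acc ++ List.replicate (counts.getD c 0).toNat c) []

-- ===== PRECONDITION & SPEC =====
def Spec_candidate_output_tables_from_cell_name_py (cell_name : String) (available_table_names : List String) (out : List String) : Prop := out = candidate_output_tables_from_cell_name_py_alt cell_name available_table_names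
instance (cell_name : String) (available_table_names : List String) (out : List String) : Decidable (Spec_candidate_output_tables_from_cell_name_py cell_name available_table_names out) := by unfold Spec_candidate_output_tables_from_cell_name_py; infer_instance

-- ===== CLAIM (what is proved, stated in full; the proofs are below) =====
def Claim_equal_candidate_output_tables_from_cell_name_py : Prop := ∀ (cell_name : String) (available_table_names : List String), Dom_candidate_output_tables_from_cell_name_py cell_name available_table_names → Spec_candidate_output_tables_from_cell_name_py cell_name available_table_names (candidate_output_tables_from_cell_name_py cell_name available_table_names)

-- ===== LEMMAS AND PROOFS =====

-- the count dictionary B builds answers List.count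
lemma pv_counts_getD (xs : List String) (d : PySem.Dict String Int) (c : String) :
    (xs.foldl (fun d t => d.insert t (d.getD t 0 + 1)) d).getD c 0 = d.getD c 0 + xs.count c := by
  induction xs generalizing d with
  | nil => simp
  | cons t ts ih =>
      simp only [List.foldl_cons, ih, PySem.Dict.getD_insert, List.count_cons]
      by_cases h : c = t
      · subst h; simp; ring
      · simp [h, Ne.symm h]

lemma pv_insertBy_append (before : String → String → Bool) (x : String) (B C : List String)
    (h : ∀ y ∈ B, before x y = false) :
    PySem.List.insertBy before x (B ++ C) = B ++ PySem.List.insertBy before x C := by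
  induction B with
  | nil => rfl
  | cons y ys ih =>
      simp only [List.cons_append, PySem.List.insertBy, h y (by simp), Bool.false_eq_true,
        if_false, ih (fun z hz => h z (by simp [hz]))]

lemma pv_insertBy_all_before (before : String → String → Bool) (x : String) (C : List String)
    (h : ∀ y ∈ C, before x y = true) :
    PySem.List.insertBy before x C = x :: C := by
  cases C with
  | nil => rfl
  | cons y ys => simp [PySem.List.insertBy, h y (by simp)]

-- inserting one more element t (a member of cands) into the canonical block shape
lemma pv_insert_canon (key : String → Int) (cands : List String) (zs : List String) (t : String)
    (hst : cands.Pairwise (fun a b => key b < key a)) (ht : t ∈ cands) :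
    PySem.List.insertBy (fun a b => decide (key b < key a)) t
        (cands.flatMap (fun c => zs.filter (fun u => decide (u = c))))
      = cands.flatMap (fun c => (zs ++ [t]).filter (fun u => decide (u = c))) := by
  induction cands with
  | nil => cases ht
  | cons c rest ih =>
      rcases List.pairwise_cons.mp hst with ⟨hc, hrest⟩
      simp only [List.flatMap_cons]
      by_cases hEq : t = c
      · subst hEq
        have hrestEq : rest.flatMap (fun c => (zs ++ [t]).filter (fun u => decide (u = c)))
            = rest.flatMap (fun c => zs.filter (fun u => decide (u = c))) := by
          refine List.flatMap_congr ?_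
          intro c' hc'
          have hne : t ≠ c' := by intro h; subst h; exact lt_irrefl _ (hc _ hc')
          simp [List.filter_append, hne]
        rw [hrestEq, pv_insertBy_append]
        · rw [pv_insertBy_all_before]
          · simp [List.filter_append]
          · intro y hy
            obtain ⟨c', hc', hy'⟩ := List.mem_flatMap.mp hy
            have hyc : y = c' := by simpa using (List.mem_filter.mp hy').2
            rw [hyc]
            simpa using hc c' hc'
        · intro y hy
          have : y = t := by simpa using (List.mem_filter.mp hy).2
          subst this; simp
      · have ht' : t ∈ rest := by
          rcases List.mem_cons.mp ht with h | h
          · exact absurd h hEq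
          · exact h
        have hlt : key t < key c := hc t ht'
        rw [pv_insertBy_append]
        · rw [ih hrest ht']
          have : (zs ++ [t]).filter (fun u => decide (u = c)) = zs.filter (fun u => decide (u = c)) := by
            simp [List.filter_append, hEq]
          rw [this]
        · intro y hy
          have : y = c := by simpa using (List.mem_filter.mp hy).2
          subst this
          simp [not_lt.mpr (le_of_lt hlt)]

-- Python's stable sort by length, reversed, of a list whose elements all lie in a
-- strictly key-descending candidate list, is the concatenation of its equal-value blocks
lemma pv_sorted_blocks (key : String → Int) (cands : List String)
    (hst : cands.Pairwise (fun a b => key b < key a)) (xs : List String)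
    (hmem : ∀ t ∈ xs, t ∈ cands) :
    PySem.List.sorted xs key true = cands.flatMap (fun c => xs.filter (fun u => decide (u = c))) := by
  rw [PySem.List.sorted_rev_eq_foldl_insertBy]
  induction xs using List.reverseRecOn with
  | nil => simp
  | append_singleton zs t ih =>
      rw [List.foldl_append]
      simp only [List.foldl_cons, List.foldl_nil]
      rw [ih (fun u hu => hmem u (by simp [hu]))]
      exact pv_insert_canon key cands zs t hst (hmem t (by simp))

-- A's match predicate holds exactly on B's candidate list
lemma pv_match_iff (remainder t : String) :
    (remainder == t || PySem.Str.startswith remainder (t ++ "_")) = true ↔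
      t ∈ (remainder ::
        (((List.range remainder.toList.length).reverse.filter
            (fun i => remainder.toList[i]? == some '_')).map
          (fun (i : Nat) => PySem.Str.slice remainder none (some (i : Int))))) := by
  have hslice : ∀ i : Nat, (PySem.Str.slice remainder none (some (i : Int))).toList
      = remainder.toList.take i := by
    intro i
    rw [PySem.Str.toList_slice, PySem.Chars.slice_eq_listSlice, PySem.List.slice_to_natCast]
  constructor
  · intro h
    rcases Bool.or_eq_true _ _ |>.mp h with h | h
    · exact (beq_iff_eq.mp h) ▸ List.mem_cons_self
    · -- startswith: t.toList ++ ['_'] is a prefix of remainder.toList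
      rw [PySem.Str.startswith_eq] at h
      have hpre : (t ++ "_").toList <+: remainder.toList := (PySem.Chars.startswith_iff _ _).mp h
      rw [String.toList_append] at hpre
      rcases hpre with ⟨rest, hrest⟩
      have hrest' : remainder.toList = t.toList ++ '_' :: rest := by
        simpa using hrest.symm
      have hmemi : t.toList.length ∈ (List.range remainder.toList.length).reverse.filter
          (fun i => remainder.toList[i]? == some '_') := by
        refine List.mem_filter.mpr ⟨List.mem_reverse.mpr (List.mem_range.mpr ?_), ?_⟩
        · rw [hrest']; simp
        · rw [hrest', List.getElem?_append_right (by simp)]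
          simp
      have hteq : PySem.Str.slice remainder none (some (t.toList.length : Int)) = t := by
        rw [← String.toList_inj, hslice, hrest', List.take_left]
      exact List.mem_cons.mpr (Or.inr (hteq ▸ List.mem_map_of_mem hmemi))
  · intro h
    rcases List.mem_cons.mp h with h | h
    · subst h; simp
    · rcases List.mem_map.mp h with ⟨i, hi, hEq⟩
      have hilt : i < remainder.toList.length :=
        List.mem_range.mp (List.mem_reverse.mp (List.mem_filter.mp hi).1)
      have hunder := (List.mem_filter.mp hi).2
      have hti : t.toList = remainder.toList.take i := by
        rw [← hEq, hslice]
      have hget : remainder.toList[i]? = some '_' := by simpa using hunder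
      refine Bool.or_eq_true _ _ |>.mpr (Or.inr ?_)
      rw [PySem.Str.startswith_eq]
      refine (PySem.Chars.startswith_iff _ _).mpr ?_
      rw [String.toList_append, show ("_" : String).toList = ['_'] from rfl, hti]
      have : remainder.toList.take i ++ ['_'] = remainder.toList.take (i + 1) := by
        rw [List.take_add_one, hget]; rfl
      rw [this]
      exact List.take_prefix _ _

-- B's candidate list is strictly decreasing in length
lemma pv_cands_pairwise (remainder : String) :
    (remainder ::
        (((List.range remainder.toList.length).reverse.filter
            (fun i => remainder.toList[i]? == some '_')).map
          (fun (i : Nat) => PySem.Str.slice remainder none (some (i : Int))))).Pairwise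
      (fun a b => PySem.Str.len b < PySem.Str.len a) := by
  have hslice : ∀ i : Nat, (PySem.Str.slice remainder none (some (i : Int))).toList
      = remainder.toList.take i := by
    intro i
    rw [PySem.Str.toList_slice, PySem.Chars.slice_eq_listSlice, PySem.List.slice_to_natCast]
  have hlen : ∀ i : Nat, i < remainder.toList.length →
      PySem.Str.len (PySem.Str.slice remainder none (some (i : Int))) = (i : Int) := by
    intro i hi
    rw [PySem.Str.len_eq, hslice]
    simp only [List.length_take]
    push_cast
    omega
  have hidx : ((List.range remainder.toList.length).reverse.filter
      (fun i => remainder.toList[i]? == some '_')).Pairwise (fun i j => j < i) := by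
    exact List.Pairwise.filter _ (List.pairwise_reverse.mpr List.pairwise_lt_range)
  have hmemlt : ∀ i ∈ (List.range remainder.toList.length).reverse.filter
      (fun i => remainder.toList[i]? == some '_'), i < remainder.toList.length := by
    intro i hi
    have := (List.mem_filter.mp hi).1
    rw [List.mem_reverse, List.mem_range] at this; exact this
  refine List.pairwise_cons.mpr ⟨?_, ?_⟩
  · intro b hb
    rcases List.mem_map.mp hb with ⟨i, hi, hEq⟩
    rw [← hEq, hlen i (hmemlt i hi), PySem.Str.len_eq]
    exact_mod_cast hmemlt i hi
  · rw [List.pairwise_map]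
    refine List.Pairwise.imp_of_mem ?_ hidx
    intro i j hi hj hji
    rw [hlen i (hmemlt i hi), hlen j (hmemlt j hj)]
    exact_mod_cast hji

-- core equivalence over an arbitrary remainder
lemma pv_core (remainder : String) (xs : List String) :
    PySem.List.sorted
        (xs.filter (fun table_name =>
          remainder == table_name || PySem.Str.startswith remainder (table_name ++ "_")))
        (fun t => PySem.Str.len t) true
      = (remainder ::
          (((List.range remainder.toList.length).reverse.filter
              (fun i => remainder.toList[i]? == some '_')).map
            (fun (i : Nat) => PySem.Str.slice remainder none (some (i : Int))))).foldl
          (fun acc c => acc ++ List.replicate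
            (((xs.foldl (fun d t => d.insert t (d.getD t 0 + 1))
                (PySem.Dict.empty : PySem.Dict String Int)).getD c 0)).toNat c) []
  := by
  set cands := remainder ::
      (((List.range remainder.toList.length).reverse.filter
          (fun i => remainder.toList[i]? == some '_')).map
        (fun (i : Nat) => PySem.Str.slice remainder none (some (i : Int)))) with hcands
  have hcount : ∀ c : String,
      (List.replicate (((xs.foldl (fun d t => d.insert t (d.getD t 0 + 1))
          (PySem.Dict.empty : PySem.Dict String Int)).getD c 0)).toNat c)
        = xs.filter (fun u => decide (u = c)) := by
    intro c
    rw [pv_counts_getD, PySem.Dict.getD_empty, zero_add, Int.toNat_natCast]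
    rw [List.filter_eq]
  have hrhs : (cands.foldl (fun acc c => acc ++ List.replicate
      (((xs.foldl (fun d t => d.insert t (d.getD t 0 + 1))
          (PySem.Dict.empty : PySem.Dict String Int)).getD c 0)).toNat c) [])
      = cands.flatMap (fun c => xs.filter (fun u => decide (u = c))) := by
    rw [PySem.List.foldl_append_eq_flatMap, List.nil_append]
    exact List.flatMap_congr (fun c _ => hcount c)
  rw [hrhs]
  rw [pv_sorted_blocks (fun t => PySem.Str.len t) cands (pv_cands_pairwise remainder)]
  · refine List.flatMap_congr ?_
    intro c hc
    rw [List.filter_comm]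
    refine List.filter_eq_self.mpr ?_
    intro a ha
    have ha' : a = c := by simpa using (List.mem_filter.mp ha).2
    subst ha'
    exact (pv_match_iff remainder a).mpr hc
  · intro t ht
    exact (pv_match_iff remainder t).mp (List.mem_filter.mp ht).2

-- ===== VERDICT (by name: the statement is the Claim_ definition above) =====
theorem candidate_output_tables_from_cell_name_py_spec : Claim_equal_candidate_output_tables_from_cell_name_py := by
  intro cell_name available_table_names _
  unfold Spec_candidate_output_tables_from_cell_name_py
  unfold candidate_output_tables_from_cell_name_py candidate_output_tables_from_cell_name_py_alt
  by_cases h0 : cell_name.toList = []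
  · simp [h0]
  · simp only [h0, if_false]
    exact pv_core _ _
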